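-- pv_equiv track=rewrite | github.com/gogusalexander/Lab | bin4.py | min_time_to_copy
-- ===== SOURCE A (Python) =====
-- def min_time_to_copy(n, x, y):
--     # Если x больше y, меняем местами x и y для оптимизации (чтобы x было наименьшим)
--     if x > y:
--         x, y = y, x
--
--     # Начнем бинарный поиск
--     left = 0
--     right = n * x
--
--     while left < right:
--         mid = (left + right) // 2
--
--         # Время, за которое будут сделаны копии
--         # Один ксерокс делает копии каждые x секунд, другой каждые y секунд
--         copies = mid // x + mid // y
--
--         if copies >= n:
--             right = mid
--         else:
--             left = mid + 1
--
--     return left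
-- ===== SOURCE B (Python) =====
-- def min_time_to_copy(n, x, y):
--     a, b = min(x, y), max(x, y)
--     if n <= 0 or a <= 0:
--         return 0
--     # least t with t//a + t//b >= n; it is a multiple of a or of b.
--     # Start each count at its analytic estimate and step up to the target.
--     m = n * b // (a + b)
--     while m + m * a // b < n:
--         m += 1
--     k = n * a // (a + b)
--     while k + k * b // a < n:
--         k += 1
--     return min(a * m, b * k)
-- ===== Notes on version B (the rewrite author's own statement) =====
-- stated objective: alternative
-- what changed: Replaces the O(log(n*x)) binary search by closed-form floor arithmetic: the answer is the smaller of the least multiple of x and the least multiple of y reaching n copies, each obtained from the analytic estimate n*b//(a+b) plus a small fix-up loop; Pre_ excludes the out-of-natural-domain inputs with n<0 and both copier speeds negative, where A's search runs on a non-monotone predicate and either raises ZeroDivisionError or returns an accidental value, while B naturally returns 0.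
-- outside the precondition, e.g. on min_time_to_copy(-2, -3, -4): A returns 8, B returns 0
import Mathlib
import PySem

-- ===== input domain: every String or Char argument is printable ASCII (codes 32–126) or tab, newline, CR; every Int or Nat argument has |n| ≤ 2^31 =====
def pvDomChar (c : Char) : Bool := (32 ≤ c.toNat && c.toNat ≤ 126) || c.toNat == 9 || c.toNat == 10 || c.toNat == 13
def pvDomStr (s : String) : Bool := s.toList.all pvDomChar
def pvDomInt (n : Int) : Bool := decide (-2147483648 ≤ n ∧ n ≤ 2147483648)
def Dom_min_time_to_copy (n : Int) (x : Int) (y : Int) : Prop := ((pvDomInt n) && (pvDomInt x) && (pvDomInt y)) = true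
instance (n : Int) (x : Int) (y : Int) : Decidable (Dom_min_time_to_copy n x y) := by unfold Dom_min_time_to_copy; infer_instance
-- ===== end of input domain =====

-- B replaces A's binary search by closed-form floor arithmetic (analytic estimate + bounded fix-up): a different algorithm of constant loop count.


-- midpoint bounds used by the loop's termination argument
theorem pvMid_lt (l r : Int) (h : l < r) : PySem.Int.floordiv (l + r) 2 < r := by
  rw [PySem.Int.floordiv_lt_iff_lt_mul (by omega : (0:Int) < 2)]; omega

theorem pvLe_mid (l r : Int) (h : l < r) : l ≤ PySem.Int.floordiv (l + r) 2 := by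
  rw [PySem.Int.le_floordiv_iff_mul_le (by omega : (0:Int) < 2)]; omega

-- ===== PORT A =====
-- the 'while left < right' loop of A, verbatim
def pvLoopA (n x y left right : Int) : Int :=
  if h : left < right then
    let mid := PySem.Int.floordiv (left + right) 2
    let copies := PySem.Int.floordiv mid x + PySem.Int.floordiv mid y
    if copies ≥ n then pvLoopA n x y left mid
    else pvLoopA n x y (mid + 1) right
  else left
termination_by (right - left).toNat
decreasing_by
· have h1 := pvMid_lt left right h
  have h2 := pvLe_mid left right h
  omega
· have h1 := pvMid_lt left right h
  have h2 := pvLe_mid left right h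
  omega

def min_time_to_copy (n : Int) (x : Int) (y : Int) : Int :=
  let p := if x > y then (y, x) else (x, y)
  pvLoopA n p.1 p.2 0 (n * p.1)

-- ===== PORT B =====
-- Source B's 'while m + m*a//b < n: m += 1' fix-up loop; the fuel only guards totality
-- (it is proved sufficient on the branch that runs it)
def pvFix (n a b m : Int) : Nat → Int
  | 0 => m
  | fuel + 1 =>
    if m + PySem.Int.floordiv (m * a) b < n then pvFix n a b (m + 1) fuel else m

-- Source B's body on a = min(x,y), b = max(x,y)
def pvAltCore (n a b : Int) : Int :=
  if n ≤ 0 ∨ a ≤ 0 then 0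
  else
    let m0 := PySem.Int.floordiv (n * b) (a + b)
    let m := pvFix n a b m0 ((n - m0).toNat + 1)
    let k0 := PySem.Int.floordiv (n * a) (a + b)
    let k := pvFix n b a k0 ((n - k0).toNat + 1)
    min (a * m) (b * k)

def min_time_to_copy_alt (n : Int) (x : Int) (y : Int) : Int :=
  pvAltCore n (min x y) (max x y)

-- ===== PRECONDITION & SPEC =====
-- Pre_ restricts to the task's natural domain at the corners where A's binary search runs on a
-- NON-MONOTONE predicate (n < 0 with both copier speeds negative): there A either raises
-- ZeroDivisionError (when max(x,y) = 0) or returns a value that is an accident of which midpoint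
-- the search probes first; B naturally returns 0 on all degenerate inputs.
def Pre_min_time_to_copy (n : Int) (x : Int) (y : Int) : Prop :=
  ¬ (n < 0 ∧ max x y < 0) ∧ ¬ (n * min x y > 0 ∧ max x y = 0)
instance (n : Int) (x : Int) (y : Int) : Decidable (Pre_min_time_to_copy n x y) := by
  unfold Pre_min_time_to_copy; infer_instance

def pvWitness_min_time_to_copy : Int × Int × Int := (4, 2, 3)

def Spec_min_time_to_copy (n : Int) (x : Int) (y : Int) (out : Int) : Prop := out = min_time_to_copy_alt n x y
instance (n : Int) (x : Int) (y : Int) (out : Int) : Decidable (Spec_min_time_to_copy n x y out) := by unfold Spec_min_time_to_copy; infer_instance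

-- ===== CLAIM (what is proved, stated in full; the proofs are below) =====
def Claim_equal_min_time_to_copy : Prop := ∀ (n : Int) (x : Int) (y : Int), Dom_min_time_to_copy n x y → Pre_min_time_to_copy n x y → Spec_min_time_to_copy n x y (min_time_to_copy n x y)

-- ===== LEMMAS AND PROOFS =====

-- ---- basic floor-division facts ----
theorem pvFd_mul_le (t b : Int) (hb : 0 < b) : PySem.Int.floordiv t b * b ≤ t := by
  have h := PySem.Int.floordiv_mul_add_mod t b
  have h2 := PySem.Int.mod_nonneg t hb
  omega

theorem pvFd_nonneg (t b : Int) (hb : 0 < b) (ht : 0 ≤ t) : 0 ≤ PySem.Int.floordiv t b := by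
  exact (PySem.Int.le_floordiv_iff_mul_le (a := t) (q := 0) hb).mpr (by omega)

theorem pvFd_mono (t1 t2 b : Int) (hb : 0 < b) (h : t1 ≤ t2) :
    PySem.Int.floordiv t1 b ≤ PySem.Int.floordiv t2 b := by
  rw [PySem.Int.le_floordiv_iff_mul_le hb]
  exact le_trans (pvFd_mul_le t1 b hb) h

theorem pvFd_mul_self (m a : Int) (ha : 0 < a) : PySem.Int.floordiv (a * m) a = m := by
  rw [PySem.Int.floordiv_eq_iff_of_pos ha]
  constructor <;> nlinarith

-- for a negative divisor: q ≤ t // b ↔ t ≤ q * b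
theorem pvFd_ge_iff_neg (t b q : Int) (hb : b < 0) :
    q ≤ PySem.Int.floordiv t b ↔ t ≤ q * b := by
  have h := PySem.Int.floordiv_mul_add_mod t b
  have h2 := PySem.Int.mod_neg_bounds t hb
  constructor
  · intro hq
    have : q * b ≥ PySem.Int.floordiv t b * b := by
      exact mul_le_mul_of_nonpos_right hq (by omega)
    omega
  · intro ht
    by_contra hc
    push_neg at hc
    have : PySem.Int.floordiv t b ≤ q - 1 := by omega
    have : PySem.Int.floordiv t b * b ≥ (q - 1) * b :=
      mul_le_mul_of_nonpos_right this (by omega)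
    nlinarith

-- ---- binary-search trace lemmas about pvLoopA ----

-- if the predicate holds on all of [0, r], the search returns 0
theorem pvLoopA_allTrue (n x y : Int) : ∀ (fuelr : Nat) (r : Int), r.toNat ≤ fuelr → 0 ≤ r →
    (∀ t, 0 ≤ t → t ≤ r → n ≤ PySem.Int.floordiv t x + PySem.Int.floordiv t y) →
    pvLoopA n x y 0 r = 0 := by
  intro fuelr
  induction fuelr with
  | zero =>
    intro r hr h0 _
    rw [pvLoopA]
    simp only [show ¬ (0 < r) by omega, dite_false]
  | succ f ih =>
    intro r hr h0 hp
    rw [pvLoopA]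
    by_cases hlt : (0:Int) < r
    · simp only [hlt, dite_true]
      have hmid1 : PySem.Int.floordiv (0 + r) 2 < r := pvMid_lt 0 r hlt
      have hmid2 : (0:Int) ≤ PySem.Int.floordiv (0 + r) 2 := pvLe_mid 0 r hlt
      have hcop : n ≤ PySem.Int.floordiv (PySem.Int.floordiv (0 + r) 2) x +
          PySem.Int.floordiv (PySem.Int.floordiv (0 + r) 2) y :=
        hp _ hmid2 (by omega)
      simp only [ge_iff_le, hcop, if_true]
      exact ih _ (by omega) (by omega) (fun t h1 h2 => hp t h1 (by omega))
    · simp only [hlt, dite_false]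

-- on a threshold predicate (false below T, true from T on), the search finds T
theorem pvLoopA_lowerBound (n x y : Int) : ∀ (fuel : Nat) (l r T : Int), (r - l).toNat ≤ fuel →
    l ≤ T → T ≤ r →
    (∀ t, T ≤ t → n ≤ PySem.Int.floordiv t x + PySem.Int.floordiv t y) →
    (∀ t, l ≤ t → t < T → ¬ n ≤ PySem.Int.floordiv t x + PySem.Int.floordiv t y) →
    pvLoopA n x y l r = T := by
  intro fuel
  induction fuel with
  | zero =>
    intro l r T hf h1 h2 _ _
    rw [pvLoopA]
    simp only [show ¬ (l < r) by omega, dite_false]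
    omega
  | succ f ih =>
    intro l r T hf h1 h2 htrue hfalse
    rw [pvLoopA]
    by_cases hlt : l < r
    · simp only [hlt, dite_true]
      have hmid1 : PySem.Int.floordiv (l + r) 2 < r := pvMid_lt l r hlt
      have hmid2 : l ≤ PySem.Int.floordiv (l + r) 2 := pvLe_mid l r hlt
      by_cases hT : T ≤ PySem.Int.floordiv (l + r) 2
      · have hcop := htrue _ hT
        simp only [ge_iff_le, hcop, if_true]
        exact ih _ _ _ (by omega) h1 hT htrue hfalse
      · have hcop := hfalse _ hmid2 (by omega)
        simp only [ge_iff_le, hcop, if_false]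
        exact ih _ _ _ (by omega) (by omega) h2 htrue (fun t h1 h2 => hfalse t (by omega) h2)
    · simp only [hlt, dite_false]; omega

-- ---- facts about the fix-up loop ----

-- with enough fuel, pvFix returns the least m' ≥ m with m' + m'*a//b ≥ n
theorem pvFix_spec (n a b : Int) (ha : 0 < a) (hb : 0 < b) :
    ∀ (fuel : Nat) (m : Int), 0 ≤ m → (n - m).toNat < fuel →
    (m ≤ pvFix n a b m fuel ∧
     n ≤ pvFix n a b m fuel + PySem.Int.floordiv (pvFix n a b m fuel * a) b ∧
     (∀ j, m ≤ j → j < pvFix n a b m fuel →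
        j + PySem.Int.floordiv (j * a) b < n)) := by
  intro fuel
  induction fuel with
  | zero => intro m _ hf; omega
  | succ f ih =>
    intro m hm hf
    rw [pvFix]
    by_cases hc : m + PySem.Int.floordiv (m * a) b < n
    · simp only [hc, if_true]
      have hfd : 0 ≤ PySem.Int.floordiv (m * a) b :=
        pvFd_nonneg _ _ hb (by positivity)
      have hrec := ih (m + 1) (by omega) (by omega)
      refine ⟨by omega, hrec.2.1, ?_⟩
      intro j hj1 hj2
      rcases eq_or_lt_of_le hj1 with h | h
      · rw [← h]; exact hc
      · exact hrec.2.2 j (by omega) hj2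
    · simp only [hc, if_false]
      exact ⟨le_refl m, by omega, fun j h1 h2 => by omega⟩

-- the analytic estimate never overshoots: m0 + m0*a//b ≤ n for m0 = n*b // (a+b)
theorem pvEstimate_le (n a b : Int) (ha : 0 < a) (hb : 0 < b) (hn : 0 < n) :
    PySem.Int.floordiv (n * b) (a + b) +
      PySem.Int.floordiv (PySem.Int.floordiv (n * b) (a + b) * a) b ≤ n := by
  set m0 := PySem.Int.floordiv (n * b) (a + b) with hm0
  have h1 : m0 * (a + b) ≤ n * b := pvFd_mul_le _ _ (by omega)
  have h2 : PySem.Int.floordiv (m0 * a) b * b ≤ m0 * a := pvFd_mul_le _ _ hb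
  have h3 : (m0 + PySem.Int.floordiv (m0 * a) b) * b ≤ n * b := by nlinarith
  exact le_of_mul_le_mul_right h3 hb

-- combined minimality: everything in [0, result) fails the target
theorem pvFix_least (n a b : Int) (ha : 0 < a) (hb : 0 < b) (hn : 0 < n) :
    ∀ j, 0 ≤ j →
      j < pvFix n a b (PySem.Int.floordiv (n * b) (a + b))
            ((n - PySem.Int.floordiv (n * b) (a + b)).toNat + 1) →
      j + PySem.Int.floordiv (j * a) b < n := by
  set m0 := PySem.Int.floordiv (n * b) (a + b) with hm0
  have hm0n : 0 ≤ m0 := pvFd_nonneg _ _ (by omega) (by positivity)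
  have hspec := pvFix_spec n a b ha hb ((n - m0).toNat + 1) m0 hm0n (by omega)
  intro j hj hjlt
  by_cases hjm : m0 ≤ j
  · exact hspec.2.2 j hjm hjlt
  · push_neg at hjm
    have hest := pvEstimate_le n a b ha hb hn
    rw [← hm0] at hest
    have hmono : PySem.Int.floordiv (j * a) b ≤ PySem.Int.floordiv (m0 * a) b :=
      pvFd_mono _ _ _ hb (by nlinarith)
    omega

-- the result of the fix-up is at most n (so a * m ≤ n * a)
theorem pvFix_le_n (n a b : Int) (ha : 0 < a) (hb : 0 < b) (hn : 0 < n) :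
    pvFix n a b (PySem.Int.floordiv (n * b) (a + b))
      ((n - PySem.Int.floordiv (n * b) (a + b)).toNat + 1) ≤ n := by
  set m0 := PySem.Int.floordiv (n * b) (a + b) with hm0
  have hm0n : 0 ≤ m0 := pvFd_nonneg _ _ (by omega) (by positivity)
  by_contra hc
  push_neg at hc
  have hleast := pvFix_least n a b ha hb hn n (by omega) hc
  have : 0 ≤ PySem.Int.floordiv (n * a) b := pvFd_nonneg _ _ hb (by positivity)
  omega

-- ---- the core equality on the sorted pair ----
theorem pvCore (n a b : Int) (hab : a ≤ b)
    (hpre1 : ¬ (n < 0 ∧ b < 0)) (hpre2 : ¬ (n * a > 0 ∧ b = 0)) :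
    pvLoopA n a b 0 (n * a) = pvAltCore n a b := by
  by_cases h0 : n ≤ 0 ∨ a ≤ 0
  · rw [pvAltCore]
    simp only [h0, if_true]
    by_cases hna : n * a ≤ 0
    · -- loop never runs
      rw [pvLoopA]
      simp only [show ¬ ((0:Int) < n * a) by omega, dite_false]
    · -- n * a > 0 with n ≤ 0 ∨ a ≤ 0 forces n < 0 ∧ a < 0, hence b > 0 by Pre_
      push_neg at hna
      have hnz : n ≠ 0 := by rintro rfl; simp at hna
      have haz : a ≠ 0 := by rintro rfl; simp at hna
      have hn : n < 0 ∧ a < 0 := by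
        rcases h0 with h | h
        · exact ⟨by omega, by nlinarith⟩
        · exact ⟨by nlinarith, by omega⟩
      have hb : 0 < b := by
        rcases lt_trichotomy b 0 with h | h | h
        · exact absurd ⟨hn.1, h⟩ hpre1
        · exact absurd ⟨by omega, h⟩ hpre2
        · exact h
      -- one copier is productive: the predicate is true everywhere, the search collapses to 0
      apply pvLoopA_allTrue n a b (n * a).toNat (n * a) (by omega) (by omega)
      intro t ht1 ht2
      have h1 : n ≤ PySem.Int.floordiv t a := by
        rw [pvFd_ge_iff_neg _ _ _ hn.2]; omega
      have h2 : 0 ≤ PySem.Int.floordiv t b := pvFd_nonneg _ _ hb ht1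
      omega
  · -- n > 0 and 0 < a ≤ b : the real search
    push_neg at h0
    have hn : 0 < n := h0.1
    have ha : 0 < a := h0.2
    have hb : 0 < b := by omega
    rw [pvAltCore]
    simp only [show ¬ (n ≤ 0 ∨ a ≤ 0) by omega, if_false]
    set m0 := PySem.Int.floordiv (n * b) (a + b) with hm0
    set m := pvFix n a b m0 ((n - m0).toNat + 1) with hm
    set k0 := PySem.Int.floordiv (n * a) (a + b) with hk0
    set k := pvFix n b a k0 ((n - k0).toNat + 1) with hk
    have hm0n : 0 ≤ m0 := pvFd_nonneg _ _ (by omega) (by positivity)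
    have hk0n : 0 ≤ k0 := pvFd_nonneg _ _ (by omega) (by positivity)
    have hmspec := pvFix_spec n a b ha hb ((n - m0).toNat + 1) m0 hm0n (by omega)
    have hkspec := pvFix_spec n b a hb ha ((n - k0).toNat + 1) k0 hk0n (by omega)
    rw [← hm] at hmspec
    rw [← hk] at hkspec
    have hmn : 0 ≤ m := le_trans hm0n hmspec.1
    have hkn : 0 ≤ k := le_trans hk0n hkspec.1
    have hmle : m ≤ n := by
      have h := pvFix_le_n n a b ha hb hn
      rw [← hm0, ← hm] at h
      exact h
    have hmleast : ∀ j, 0 ≤ j → j < m → j + PySem.Int.floordiv (j * a) b < n := by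
      have h := pvFix_least n a b ha hb hn
      rw [← hm0, ← hm] at h
      exact h
    have hkleast : ∀ j, 0 ≤ j → j < k → j + PySem.Int.floordiv (j * b) a < n := by
      have h := pvFix_least n b a hb ha hn
      rw [add_comm b a] at h
      rw [← hk0, ← hk] at h
      exact h
    set T := min (a * m) (b * k) with hT
    have hpam : n ≤ PySem.Int.floordiv (a * m) a + PySem.Int.floordiv (a * m) b := by
      rw [pvFd_mul_self m a ha]
      have := hmspec.2.1
      rw [mul_comm a m]
      omega
    have hpbk : n ≤ PySem.Int.floordiv (b * k) a + PySem.Int.floordiv (b * k) b := by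
      rw [pvFd_mul_self k b hb]
      have := hkspec.2.1
      rw [mul_comm b k]
      omega
    apply pvLoopA_lowerBound n a b ((n * a - 0).toNat) 0 (n * a) T (by omega)
    · simp only [hT, le_min_iff]
      constructor <;> positivity
    · calc T ≤ a * m := min_le_left _ _
      _ ≤ a * n := by nlinarith
      _ = n * a := mul_comm a n
    · intro t ht
      have hx : PySem.Int.floordiv T a + PySem.Int.floordiv T b ≥ n := by
        rcases min_cases (a * m) (b * k) with ⟨he, _⟩ | ⟨he, _⟩ <;>
          rw [hT, he]
        · exact hpam
        · exact hpbk
      have h1 := pvFd_mono T t a ha ht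
      have h2 := pvFd_mono T t b hb ht
      omega
    · intro t ht1 ht2 hcon
      set qa := PySem.Int.floordiv t a with hqa
      set qb := PySem.Int.floordiv t b with hqb
      have hqan : 0 ≤ qa := pvFd_nonneg _ _ ha ht1
      have hqbn : 0 ≤ qb := pvFd_nonneg _ _ hb ht1
      have hqaa : qa * a ≤ t := pvFd_mul_le t a ha
      have hqbb : qb * b ≤ t := pvFd_mul_le t b hb
      by_cases hu : b * qb ≤ a * qa
      · have hqam : qa < m := by
          have : a * qa ≤ t := by rw [mul_comm a qa]; exact hqaa
          have htT : t < a * m := lt_of_lt_of_le ht2 (min_le_left _ _)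
          nlinarith
        have hge : n ≤ qa + PySem.Int.floordiv (qa * a) b := by
          have h1 : PySem.Int.floordiv (b * qb) b ≤ PySem.Int.floordiv (qa * a) b :=
            pvFd_mono _ _ _ hb (by nlinarith)
          rw [pvFd_mul_self qb b hb] at h1
          omega
        have := hmleast qa hqan hqam
        omega
      · push_neg at hu
        have hqbk : qb < k := by
          have htT : t < b * k := lt_of_lt_of_le ht2 (min_le_right _ _)
          nlinarith
        have hge : n ≤ qb + PySem.Int.floordiv (qb * b) a := by
          have h1 : PySem.Int.floordiv (a * qa) a ≤ PySem.Int.floordiv (qb * b) a :=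
            pvFd_mono _ _ _ ha (by nlinarith)
          rw [pvFd_mul_self qa a ha] at h1
          omega
        have := hkleast qb hqbn hqbk
        omega

-- ===== VERDICT (by name: the statement is the Claim_ definition above) =====
theorem min_time_to_copy_spec : Claim_equal_min_time_to_copy := by
  intro n x y _ hpre
  unfold Spec_min_time_to_copy min_time_to_copy min_time_to_copy_alt
  unfold Pre_min_time_to_copy at hpre
  by_cases hxy : x > y
  · have hmin : min x y = y := by omega
    have hmax : max x y = x := by omega
    rw [hmin, hmax] at hpre ⊢
    simp only [hxy, if_true]
    exact pvCore n y x (by omega) hpre.1 hpre.2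
  · have hmin : min x y = x := by omega
    have hmax : max x y = y := by omega
    rw [hmin, hmax] at hpre ⊢
    simp only [hxy, if_false]
    exact pvCore n x y (by omega) hpre.1 hpre.2
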